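-- pv_equiv track=rewrite | github.com/JuanFernandoCastaneda/algorithm-analysis-compression | shannon-fano/shannon-fano.py | reverse_codification
-- ===== SOURCE A (Python) =====
-- def reverse_codification(codification: str, reverse_codes: dict):
--     carry = ""
--     result = ""
--     for bit in codification:
--         if carry+bit in reverse_codes:
--             result += reverse_codes[carry+bit]
--             carry = ""
--         else:
--             carry += bit
--     return result
-- ===== SOURCE B (Python) =====
-- def _build_trie(reverse_codes):
--     """Prefix trie: children keyed by char; a key's symbol stored under None."""
--     root = {}
--     for code, sym in reverse_codes.items():
--         node = root
--         for ch in code: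
--             node = node.setdefault(ch, {})
--         node.setdefault(None, sym)
--     return root
--
-- def reverse_codification(codification: str, reverse_codes: dict):
--     root = _build_trie(reverse_codes)
--     out = []
--     node = root
--     for ch in codification:
--         if node is not None:
--             node = node.get(ch)
--             if node is not None and None in node:
--                 out.append(node[None])
--                 node = root
--     return "".join(out)
-- ===== Notes on version B (the rewrite author's own statement) =====
-- stated objective: faster
-- what changed: B replaces A's carry-string plus per-bit dict lookups with a prefix trie built once from reverse_codes (symbol stored at every key's node), then decodes in one pass walking a current-node pointer that emits and resets to the root at the first terminal node and goes dead once the path leaves the trie.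
import Mathlib
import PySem

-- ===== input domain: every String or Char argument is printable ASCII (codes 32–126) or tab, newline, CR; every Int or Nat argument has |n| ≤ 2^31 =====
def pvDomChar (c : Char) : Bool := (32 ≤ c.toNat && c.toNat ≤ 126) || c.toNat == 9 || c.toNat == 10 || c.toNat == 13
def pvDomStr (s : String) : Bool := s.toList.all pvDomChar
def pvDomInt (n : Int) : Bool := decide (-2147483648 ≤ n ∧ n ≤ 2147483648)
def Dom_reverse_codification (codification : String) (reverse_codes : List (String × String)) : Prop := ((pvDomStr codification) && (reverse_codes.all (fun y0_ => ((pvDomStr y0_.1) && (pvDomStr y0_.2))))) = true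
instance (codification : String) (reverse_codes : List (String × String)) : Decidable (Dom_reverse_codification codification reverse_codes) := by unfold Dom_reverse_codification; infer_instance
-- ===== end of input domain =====

-- B replaces A's growing carry string and per-bit dict lookups by a prefix trie built once
-- from reverse_codes, then a one-pass node-pointer walk; objective: alternative data structure.

-- ===== PORT A =====
-- carry (a Python string) is rendered as its List Char; 'carry + bit in reverse_codes' /
-- 'reverse_codes[carry+bit]' are the combined first-match lookup PySem.Dict.get?.
def reverse_codification (codification : String) (reverse_codes : List (String × String)) : String :=
  (codification.toList.foldl
    (fun (st : List Char × String) bit =>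
      match PySem.Dict.get? (PySem.Dict.mk reverse_codes) (String.ofList (st.1 ++ [bit])) with
      | some v => ([], st.2 ++ v)          -- result += reverse_codes[carry+bit]; carry = ""
      | none   => (st.1 ++ [bit], st.2))   -- carry += bit
    ([], "")).2

-- ===== PORT B =====
-- Source B's nested-dict trie node {ch: child, None: sym} as a mutual inductive:
-- the optional symbol (the None entry) plus an ordered child list keyed by Char.
mutual
inductive RTrie where
  | mk : Option String → RChildren → RTrie
  deriving Repr
inductive RChildren where
  | nil : RChildren
  | cons : Char → RTrie → RChildren → RChildren
  deriving Repr
end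

def rsym : RTrie → Option String
  | .mk s _ => s

def rkids : RTrie → RChildren
  | .mk _ k => k

-- node.get(ch): first (only) child for ch
def rchild? : RChildren → Char → Option RTrie
  | .nil, _ => none
  | .cons c t rest, ch => if c = ch then some t else rchild? rest ch

-- replace the child for c by t' (or append it): the effect of node.setdefault(ch, {}) + mutation
def rupdate : RChildren → Char → RTrie → RChildren
  | .nil, c, t' => .cons c t' .nil
  | .cons c' t rest, c, t' => if c' = c then .cons c' t' rest else .cons c' t (rupdate rest c t')

-- descend along the code creating nodes, node.setdefault(None, sym) at the end (first entry wins)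
def rinsert : RTrie → List Char → String → RTrie
  | .mk s k, [], v => .mk (s.or (some v)) k
  | .mk s k, c :: cs, v =>
    .mk s (rupdate k c (rinsert ((rchild? k c).getD (.mk none .nil)) cs v))

-- _build_trie: fold the (code, sym) pairs into the trie
def rbuild : RTrie → List (String × String) → RTrie
  | t, [] => t
  | t, (k, v) :: rest => rbuild (rinsert t k.toList v) rest

-- the decode walk: state = (current node or dead, output); emit + reset to root at a symbol
def rstep (root : RTrie) (st : Option RTrie × String) (ch : Char) : Option RTrie × String :=
  match st.1 with
  | none => st
  | some n =>
    match rchild? (rkids n) ch with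
    | none => (none, st.2)
    | some n' =>
      match rsym n' with
      | some v => (some root, st.2 ++ v)
      | none => (some n', st.2)

def reverse_codification_alt (codification : String) (reverse_codes : List (String × String)) : String :=
  let root := rbuild (.mk none .nil) reverse_codes
  (codification.toList.foldl (rstep root) (some root, "")).2

-- ===== PRECONDITION & SPEC =====
def Spec_reverse_codification (codification : String) (reverse_codes : List (String × String)) (out : String) : Prop := out = reverse_codification_alt codification reverse_codes
instance (codification : String) (reverse_codes : List (String × String)) (out : String) : Decidable (Spec_reverse_codification codification reverse_codes out) := by unfold Spec_reverse_codification; infer_instance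

-- ===== CLAIM (what is proved, stated in full; the proofs are below) =====
def Claim_equal_reverse_codification : Prop := ∀ (codification : String) (reverse_codes : List (String × String)), Dom_reverse_codification codification reverse_codes → Spec_reverse_codification codification reverse_codes (reverse_codification codification reverse_codes)

-- ===== LEMMAS AND PROOFS =====

-- node reached from t along path p, none if the path leaves the trie
def navAt : RTrie → List Char → Option RTrie
  | t, [] => some t
  | t, c :: cs => (rchild? (rkids t) c).bind (fun t' => navAt t' cs)

-- symbol stored at path p of the trie
def symAt (t : RTrie) (p : List Char) : Option String :=
  (navAt t p).bind rsym

theorem symAt_cons (t : RTrie) (c : Char) (cs : List Char) :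
    symAt t (c :: cs) = (rchild? (rkids t) c).bind (fun t' => symAt t' cs) := by
  simp [symAt, navAt]
  cases rchild? (rkids t) c <;> simp

theorem rchild?_rupdate : ∀ (k : RChildren) (c : Char) (t' : RTrie) (d : Char),
    rchild? (rupdate k c t') d = if c = d then some t' else rchild? k d
  | .nil, c, t', d => by
    by_cases h : c = d <;> simp [rupdate, rchild?, h]
  | .cons c' t rest, c, t', d => by
    by_cases h1 : c' = c
    · subst h1
      by_cases h : c' = d <;> simp [rupdate, rchild?, h]
    · have h2 : ¬ c = c' := fun e => h1 e.symm
      by_cases h : c' = d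
      · subst h
        simp [rupdate, rchild?, h1, h2]
      · simp [rupdate, rchild?, h, h1, rchild?_rupdate rest c t' d]

theorem symAt_empty (p : List Char) : symAt (.mk none .nil) p = none := by
  cases p <;> simp [symAt, navAt, rsym, rkids, rchild?]

theorem symAt_rinsert (key : List Char) :
    ∀ (t : RTrie) (v : String) (p : List Char),
      symAt (rinsert t key v) p
        = if p = key then (symAt t p).or (some v) else symAt t p := by
  induction key with
  | nil =>
    intro t v p
    obtain ⟨s, k⟩ := t
    cases p with
    | nil => simp [rinsert, symAt, navAt, rsym]
    | cons d ds => simp [rinsert, symAt, navAt, rkids]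
  | cons c cs ih =>
    intro t v p
    obtain ⟨s, k⟩ := t
    cases p with
    | nil => simp [rinsert, symAt, navAt, rsym]
    | cons d ds =>
      rw [symAt_cons, symAt_cons]
      simp only [rinsert, rkids, rchild?_rupdate]
      by_cases h : c = d
      · subst h
        rw [if_pos rfl]
        simp only [Option.bind_some]
        rw [ih]
        cases hc : rchild? k c with
        | none =>
          by_cases hd : ds = cs <;> simp [hd, symAt_empty]
        | some ct =>
          by_cases hd : ds = cs <;> simp [hd]
      · have h2 : ¬ (d :: ds = c :: cs) := by
          simp only [List.cons.injEq, not_and]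
          intro e; exact absurd e.symm h
        simp [h, h2]

-- the built trie stores exactly the dict's first-match lookups
theorem symAt_rbuild (l : List (String × String)) :
    ∀ (t : RTrie) (p : List Char),
      symAt (rbuild t l) p
        = (symAt t p).or (PySem.Dict.get? (PySem.Dict.mk l) (String.ofList p)) := by
  induction l with
  | nil => intro t p; simp [rbuild, PySem.Dict.get?]
  | cons kv rest ih =>
    intro t p
    obtain ⟨k, v⟩ := kv
    simp only [rbuild, ih, symAt_rinsert, PySem.Dict.get?_mk_cons]
    by_cases h : p = k.toList
    · subst h
      have hb : (k == String.ofList k.toList) = true := by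
        simp [String.ofList_toList]
      rw [hb]
      simp only [if_true]
      cases symAt t k.toList <;> simp
    · have hb : (k == String.ofList p) = false := by
        apply beq_false_of_ne
        intro he
        exact h (by rw [he, String.toList_ofList])
      rw [hb]
      simp [h]

theorem navAt_append (t : RTrie) (p q : List Char) :
    navAt t (p ++ q) = (navAt t p).bind (fun n => navAt n q) := by
  induction p generalizing t with
  | nil => simp [navAt]
  | cons d ds ih =>
    simp only [List.cons_append, navAt]
    cases rchild? (rkids t) d <;> simp [ih]

theorem symAt_snoc (t : RTrie) (p : List Char) (c : Char) :
    symAt t (p ++ [c])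
      = (navAt t p).bind (fun n => (rchild? (rkids n) c).bind rsym) := by
  simp only [symAt, navAt_append]
  cases navAt t p with
  | none => simp
  | some n =>
    simp only [Option.bind_some, navAt]
    cases rchild? (rkids n) c <;> simp

theorem navAt_snoc (t : RTrie) (p : List Char) (c : Char) :
    navAt t (p ++ [c])
      = (navAt t p).bind (fun n => rchild? (rkids n) c) := by
  rw [navAt_append]
  cases navAt t p with
  | none => simp
  | some n =>
    simp only [Option.bind_some, navAt]
    cases rchild? (rkids n) c <;> simp

-- main invariant: A's carry fold equals B's node-pointer fold, the pointer
-- being the node reached from the root along the carry (none once off-trie)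
theorem fold_eq_walk (l : List (String × String)) :
    ∀ (cs : List Char) (carry : List Char) (res : String),
      (cs.foldl
        (fun (st : List Char × String) bit =>
          match PySem.Dict.get? (PySem.Dict.mk l) (String.ofList (st.1 ++ [bit])) with
          | some v => ([], st.2 ++ v)
          | none   => (st.1 ++ [bit], st.2))
        (carry, res)).2
      = (cs.foldl (rstep (rbuild (.mk none .nil) l))
          (navAt (rbuild (.mk none .nil) l) carry, res)).2 := by
  intro cs
  induction cs with
  | nil => intro carry res; simp
  | cons bit tl ih =>
    intro carry res
    have hget : PySem.Dict.get? (PySem.Dict.mk l) (String.ofList (carry ++ [bit]))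
        = symAt (rbuild (.mk none .nil) l) (carry ++ [bit]) := by
      rw [symAt_rbuild, symAt_empty, Option.none_or]
    simp only [List.foldl, hget, symAt_snoc, rstep]
    cases hn : navAt (rbuild (.mk none .nil) l) carry with
    | none =>
      simp only [Option.bind_none]
      rw [ih, navAt_snoc, hn]
      simp only [Option.bind_none]
    | some n =>
      simp only [Option.bind_some]
      cases hc : rchild? (rkids n) bit with
      | none =>
        simp only [Option.bind_none]
        rw [ih, navAt_snoc, hn, Option.bind_some, hc]
      | some n' =>
        simp only [Option.bind_some]
        cases hs : rsym n' with
        | none =>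
          rw [ih, navAt_snoc, hn, Option.bind_some, hc]
        | some v =>
          rw [ih]
          simp [navAt]

-- ===== VERDICT (by name: the statement is the Claim_ definition above) =====
theorem reverse_codification_spec : Claim_equal_reverse_codification := by
  intro codification reverse_codes _
  unfold Spec_reverse_codification reverse_codification reverse_codification_alt
  have := fold_eq_walk reverse_codes codification.toList [] ""
  simpa [navAt] using this
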